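-- pv_equiv track=rewrite | github.com/bartdag/recodoc2 | recodoc2/apps/codeutil/java_element.py | filter
-- ===== SOURCE A (Python) =====
-- def filter(lines, long_line):
--     builder_syntax = False
--
--     for line in lines:
--         if line.rstrip().endswith(';'):
--             builder_syntax = False
--             break
--         elif line.find('={') > -1 and not line.startswith('@'):
--             builder_syntax = True
--     return builder_syntax
-- ===== SOURCE B (Python) =====
-- def filter(lines, long_line):
--     lines = list(lines)
--     if any(line.rstrip().endswith(';') for line in lines):
--         return False
--     return any('={' in line and not line.startswith('@') for line in lines)
-- ===== Notes on version B (the rewrite author's own statement) =====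
-- stated objective: simpler
-- what changed: Replaced the stateful loop with mutable flag and break by two independent existence checks: False if any line ends with ';', else True iff some line contains '={' and does not start with '@'.
import Mathlib
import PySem

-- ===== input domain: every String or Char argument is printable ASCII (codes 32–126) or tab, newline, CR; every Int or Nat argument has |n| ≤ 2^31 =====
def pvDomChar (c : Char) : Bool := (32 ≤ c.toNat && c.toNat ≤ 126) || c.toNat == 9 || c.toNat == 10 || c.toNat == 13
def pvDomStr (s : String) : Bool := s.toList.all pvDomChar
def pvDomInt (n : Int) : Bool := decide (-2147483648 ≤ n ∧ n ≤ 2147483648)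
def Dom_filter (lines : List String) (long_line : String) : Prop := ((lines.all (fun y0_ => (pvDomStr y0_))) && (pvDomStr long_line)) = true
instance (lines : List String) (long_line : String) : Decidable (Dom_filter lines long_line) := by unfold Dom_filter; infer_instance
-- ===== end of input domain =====

-- B replaces A's stateful loop (mutable flag + break) by two independent existence checks (objective: simpler).

-- ===== PORT A =====
-- A's for-loop with break, modelled by structural recursion: the first ';'-ending line returns False immediately
def filterGo (lines : List String) (builder_syntax : Bool) : Bool :=
  match lines with
  | [] => builder_syntax
  | line :: rest =>
    if PySem.Str.endswith (PySem.Str.rstrip line) ";" then false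
    else if PySem.Str.find line "={" > -1 && !(PySem.Str.startswith line "@") then
      filterGo rest true
    else filterGo rest builder_syntax

def filter (lines : List String) (long_line : String) : Bool :=
  filterGo lines false

-- ===== PORT B =====
def filter_alt (lines : List String) (long_line : String) : Bool :=
  if lines.any (fun line => PySem.Str.endswith (PySem.Str.rstrip line) ";") then false
  else lines.any (fun line => PySem.Str.isIn "={" line && !(PySem.Str.startswith line "@"))

-- ===== PRECONDITION & SPEC =====
def Spec_filter (lines : List String) (long_line : String) (out : Bool) : Prop := out = filter_alt lines long_line
instance (lines : List String) (long_line : String) (out : Bool) : Decidable (Spec_filter lines long_line out) := by unfold Spec_filter; infer_instance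

-- ===== CLAIM (what is proved, stated in full; the proofs are below) =====
def Claim_equal_filter : Prop := ∀ (lines : List String) (long_line : String), Dom_filter lines long_line → Spec_filter lines long_line (filter lines long_line)

-- ===== LEMMAS AND PROOFS =====
lemma find_pos_iff_isIn (line sub : String) :
    decide (PySem.Str.find line sub > -1) = PySem.Str.isIn sub line := by
  simp only [PySem.Str.find_eq, PySem.Str.isIn_eq]
  by_cases h : PySem.Chars.isIn sub.toList line.toList = true
  · have h0 := (PySem.Chars.find_nonneg_iff line.toList sub.toList).mpr
      ((PySem.Chars.isIn_iff_infix _ _).mp h)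
    simp only [h, decide_eq_true_eq]
    omega
  · have h3 : PySem.Chars.find line.toList sub.toList = -1 := by
      apply (PySem.Chars.find_eq_neg_one_iff _ _).mpr
      intro hc
      exact absurd ((PySem.Chars.isIn_iff_infix _ _).mpr hc) (by simp_all)
    simp [h3, h]

lemma filterGo_eq (lines : List String) (acc : Bool) :
    filterGo lines acc =
      if lines.any (fun line => PySem.Str.endswith (PySem.Str.rstrip line) ";") then false
      else acc || lines.any (fun line => PySem.Str.isIn "={" line && !(PySem.Str.startswith line "@")) := by
  induction lines generalizing acc with
  | nil => simp [filterGo]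
  | cons l rest ih =>
    simp only [filterGo, List.any_cons]
    rw [find_pos_iff_isIn]
    by_cases h1 : PySem.Str.endswith (PySem.Str.rstrip l) ";" = true
    · simp only [h1, Bool.true_or, if_true]
    · simp only [Bool.not_eq_true] at h1
      simp only [h1, Bool.false_eq_true, if_false, Bool.false_or]
      rw [ih, ih]
      by_cases h2 : (PySem.Str.isIn "={" l && !PySem.Str.startswith l "@") = true
      · simp only [h2, if_true, Bool.true_or, Bool.or_true]
      · simp only [Bool.not_eq_true] at h2
        simp only [h2, Bool.false_eq_true, if_false, Bool.false_or]

-- ===== VERDICT (by name: the statement is the Claim_ definition above) =====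
theorem filter_spec : Claim_equal_filter := by
  intro lines long_line _
  unfold Spec_filter filter filter_alt
  rw [filterGo_eq]
  split_ifs <;> simp
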